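-- pv_equiv track=rewrite | github.com/sarth1110/GO_player_based_on_alpha_beta_search | my_player3.py | findDeadStones
-- ===== SOURCE A (Python) =====
-- def isValidIndex(row, col):
--     if((row<5 and row>=0) and (col<5 and col>=0)):
--         return True
--     return False
--
-- def findNeighbourPositions(row, col):
--     neighbours=[]
--     neighbourList = [[-1,0],[1,0], [0,-1], [0,1]]
--     for n in neighbourList:
--         if(isValidIndex(row+n[0], col+n[1])):
--             neighbours.append([row+n[0], col+n[1]])
--     return neighbours
--
-- def findFriends(board, row, col, stone):
--     friends = []
--     BFS = [[row, col]]
--     while(len(BFS)>0):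
--         curr = BFS.pop()
--         friends.append(curr)
--         neighbours = findNeighbourPositions(curr[0], curr[1])
--         for n in neighbours:
--             if(board[n[0]][n[1]] == stone):
--                 if(([n[0], n[1]] not in BFS) and ([n[0], n[1]] not in friends)):
--                     BFS.append([n[0], n[1]])
--     return friends
--
-- def checkLiberty(board, row, col, stone):
--     count=0
--     friends = findFriends(board, row, col, stone)
--     for f in friends:
--         neighbours = findNeighbourPositions(f[0], f[1])
--         for n in neighbours:
--             if board[n[0]][n[1]]==0:
--                 count+=1
--     return count
--
-- def findDeadStones(board, stone):
--     deadStones = []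
--     for i in range(5):
--         for j in range(5):
--             if board[i][j]==stone:
--                 lib = checkLiberty(board, i, j, stone)
--                 if(lib==0):
--                     deadStones.append([i,j])
--     return deadStones
-- ===== SOURCE B (Python) =====
-- def findDeadStones(board, stone):
--     def nbrs(i, j):
--         return [(x, y) for (x, y) in ((i - 1, j), (i + 1, j), (i, j - 1), (i, j + 1))
--                 if 0 <= x < 5 and 0 <= y < 5]
--     # one global liberty propagation instead of a fresh flood-fill per stone:
--     # seed with stone cells that touch an empty point, then spread aliveness
--     # along same-colored neighbours; 25 rounds reach the fixpoint (<= 25 cells).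
--     alive = set()
--     for i in range(5):
--         for j in range(5):
--             if board[i][j] == stone and any(board[x][y] == 0 for (x, y) in nbrs(i, j)):
--                 alive.add((i, j))
--     for _ in range(25):
--         for i in range(5):
--             for j in range(5):
--                 if board[i][j] == stone and (i, j) not in alive and any(p in alive for p in nbrs(i, j)):
--                     alive.add((i, j))
--     return [[i, j] for i in range(5) for j in range(5)
--             if board[i][j] == stone and (i, j) not in alive]
-- ===== Notes on version B (the rewrite author's own statement) =====
-- stated objective: alternative
-- what changed: A re-runs a stack-based flood fill (findFriends) and liberty count for every stone on the board; B instead does one global liberty propagation: it seeds the set of stone cells adjacent to an empty point and saturates it along same-colored neighbours (a bounded fixpoint iteration), then emits in row-major order the stone cells never marked alive.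
import Mathlib
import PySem

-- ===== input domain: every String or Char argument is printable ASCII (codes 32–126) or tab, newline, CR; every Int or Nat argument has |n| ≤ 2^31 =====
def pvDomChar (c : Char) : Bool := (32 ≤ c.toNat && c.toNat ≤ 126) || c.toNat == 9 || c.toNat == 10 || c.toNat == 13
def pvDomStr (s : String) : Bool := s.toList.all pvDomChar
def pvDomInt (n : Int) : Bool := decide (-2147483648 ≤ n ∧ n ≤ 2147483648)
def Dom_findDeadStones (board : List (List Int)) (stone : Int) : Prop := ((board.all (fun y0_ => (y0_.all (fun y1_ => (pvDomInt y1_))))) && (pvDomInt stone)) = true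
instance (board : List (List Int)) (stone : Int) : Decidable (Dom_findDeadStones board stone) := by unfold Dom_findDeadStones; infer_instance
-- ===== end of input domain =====

-- B replaces A's per-stone flood fill by ONE global liberty propagation (seed the
-- stone cells touching an empty point, spread aliveness along same-colored
-- neighbours to a fixpoint), then lists the never-marked stone cells in scan order.

-- board[i][j] (both Pythons index the same way; none = IndexError, excluded by Pre_)
def pvCell (board : List (List Int)) (i j : Int) : Option Int :=
  (PySem.List.pyGet? board i).bind (fun r => PySem.List.pyGet? r j)

-- ===== PORT A =====
def isValidIndex (row col : Int) : Bool :=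
  if row < 5 ∧ 0 ≤ row ∧ col < 5 ∧ 0 ≤ col then true else false

def findNeighbourPositions (row col : Int) : List (Int × Int) :=
  [((-1 : Int), (0 : Int)), (1, 0), (0, -1), (0, 1)].foldl
    (fun acc n => if isValidIndex (row + n.1) (col + n.2) = true
                  then acc ++ [(row + n.1, col + n.2)] else acc) []

-- the while-loop of findFriends; Python pops from the END of BFS.
-- Fuel 30 is a totality guard only: the loop adds a distinct board cell to
-- `friends` each iteration (proved below), so it runs at most 26 times.
def findFriendsLoop (board : List (List Int)) (stone : Int) :
    Nat → List (Int × Int) → List (Int × Int) → List (Int × Int)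
  | 0, friends, _ => friends
  | fuel + 1, friends, BFS =>
    match BFS.getLast? with
    | none => friends
    | some curr =>
      let friends' := friends ++ [curr]
      let BFS' := (findNeighbourPositions curr.1 curr.2).foldl
        (fun b n => if pvCell board n.1 n.2 = some stone ∧ n ∉ b ∧ n ∉ friends'
                    then b ++ [n] else b) BFS.dropLast
      findFriendsLoop board stone fuel friends' BFS'

def findFriends (board : List (List Int)) (row col stone : Int) : List (Int × Int) :=
  findFriendsLoop board stone 30 [] [(row, col)]

def checkLiberty (board : List (List Int)) (row col stone : Int) : Int :=
  (findFriends board row col stone).foldl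
    (fun count f => (findNeighbourPositions f.1 f.2).foldl
      (fun c n => if pvCell board n.1 n.2 = some 0 then c + 1 else c) count) 0

def findDeadStones (board : List (List Int)) (stone : Int) : List (List Int) :=
  (PySem.List.pyRange 0 5 1).foldl (fun acc i =>
    (PySem.List.pyRange 0 5 1).foldl (fun acc2 j =>
      if pvCell board i j = some stone then
        (if checkLiberty board i j stone = 0 then acc2 ++ [[i, j]] else acc2)
      else acc2) acc) []

-- ===== PORT B =====
def nbrsB (i j : Int) : List (Int × Int) :=
  [(i - 1, j), (i + 1, j), (i, j - 1), (i, j + 1)].filter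
    (fun p => decide (0 ≤ p.1 ∧ p.1 < 5 ∧ 0 ≤ p.2 ∧ p.2 < 5))

def aliveSeed (board : List (List Int)) (stone : Int) : PySem.Set (Int × Int) :=
  (PySem.List.pyRange 0 5 1).foldl (fun s i =>
    (PySem.List.pyRange 0 5 1).foldl (fun s j =>
      if pvCell board i j = some stone ∧
          (nbrsB i j).any (fun p => pvCell board p.1 p.2 == some 0)
      then PySem.Set.add s (i, j) else s) s) PySem.Set.empty

def spreadRound (board : List (List Int)) (stone : Int)
    (s0 : PySem.Set (Int × Int)) : PySem.Set (Int × Int) :=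
  (PySem.List.pyRange 0 5 1).foldl (fun s i =>
    (PySem.List.pyRange 0 5 1).foldl (fun s j =>
      if pvCell board i j = some stone ∧ (i, j) ∉ s ∧
          (nbrsB i j).any (fun p => decide (p ∈ s))
      then PySem.Set.add s (i, j) else s) s) s0

def aliveFix (board : List (List Int)) (stone : Int) : PySem.Set (Int × Int) :=
  (PySem.List.pyRange 0 25 1).foldl (fun s _ => spreadRound board stone s)
    (aliveSeed board stone)

def findDeadStones_alt (board : List (List Int)) (stone : Int) : List (List Int) :=
  (PySem.List.pyRange 0 5 1).foldl (fun acc i =>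
    (PySem.List.pyRange 0 5 1).foldl (fun acc j =>
      if pvCell board i j = some stone ∧ (i, j) ∉ aliveFix board stone
      then acc ++ [[i, j]] else acc) acc) []

-- ===== PRECONDITION & SPEC =====
-- Pre_: the Python raises IndexError unless the first 5 rows exist and each has
-- at least 5 entries (both programs read board[i][j] for all 0 ≤ i,j < 5).
def Pre_findDeadStones (board : List (List Int)) (stone : Int) : Prop :=
  5 ≤ board.length ∧ ∀ r ∈ board.take 5, 5 ≤ r.length
instance (board : List (List Int)) (stone : Int) : Decidable (Pre_findDeadStones board stone) := by
  unfold Pre_findDeadStones; infer_instance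

def pvWitness_findDeadStones : List (List Int) × Int :=
  ([[1, 2, 0, 0, 0], [2, 1, 0, 0, 0], [0, 0, 0, 0, 0], [0, 0, 0, 0, 0], [0, 0, 0, 0, 0]], 1)

def Spec_findDeadStones (board : List (List Int)) (stone : Int) (out : List (List Int)) : Prop := out = findDeadStones_alt board stone
instance (board : List (List Int)) (stone : Int) (out : List (List Int)) : Decidable (Spec_findDeadStones board stone out) := by unfold Spec_findDeadStones; infer_instance

-- ===== CLAIM (what is proved, stated in full; the proofs are below) =====
def Claim_equal_findDeadStones : Prop := ∀ (board : List (List Int)) (stone : Int), Dom_findDeadStones board stone → Pre_findDeadStones board stone → Spec_findDeadStones board stone (findDeadStones board stone)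

-- ===== LEMMAS AND PROOFS =====

-- a position on the 5×5 board
def VPos (p : Int × Int) : Prop := 0 ≤ p.1 ∧ p.1 < 5 ∧ 0 ≤ p.2 ∧ p.2 < 5

def Adj (p q : Int × Int) : Prop := q ∈ findNeighbourPositions p.1 p.2

def StoneAt (board : List (List Int)) (stone : Int) (p : Int × Int) : Prop :=
  pvCell board p.1 p.2 = some stone

def StepS (board : List (List Int)) (stone : Int) (p q : Int × Int) : Prop :=
  Adj p q ∧ StoneAt board stone q

def ReachS (board : List (List Int)) (stone : Int) : Int × Int → Int × Int → Prop :=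
  Relation.ReflTransGen (StepS board stone)

def HasLib (board : List (List Int)) (p : Int × Int) : Prop :=
  ∃ n, Adj p n ∧ pvCell board n.1 n.2 = some 0

-- all 25 board positions, row-major
def U25 : List (Int × Int) :=
  ([0, 1, 2, 3, 4] : List Int).flatMap (fun i => ([0, 1, 2, 3, 4] : List Int).map (fun j => (i, j)))

lemma mem_ite_append {α : Type} (P : Prop) [Decidable P] (acc : List α) (x q : α) :
    q ∈ (if P then acc ++ [x] else acc) ↔ q ∈ acc ∨ (P ∧ q = x) := by
  split <;> simp_all

lemma isValidIndex_iff (r c : Int) :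
    isValidIndex r c = true ↔ (0 ≤ r ∧ r < 5 ∧ 0 ≤ c ∧ c < 5) := by
  unfold isValidIndex; split <;> rename_i h <;> simp <;> omega

lemma mem_findNeighbourPositions (r c : Int) (q : Int × Int) :
    q ∈ findNeighbourPositions r c ↔
      VPos q ∧ (q = (r - 1, c) ∨ q = (r + 1, c) ∨ q = (r, c - 1) ∨ q = (r, c + 1)) := by
  obtain ⟨q1, q2⟩ := q
  rw [findNeighbourPositions]
  simp only [List.foldl_cons, List.foldl_nil]
  rw [mem_ite_append, mem_ite_append, mem_ite_append, mem_ite_append]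
  simp only [List.not_mem_nil, false_or, isValidIndex_iff, Prod.mk.injEq, VPos]
  omega

lemma adj_vpos {p q : Int × Int} (h : Adj p q) : VPos q :=
  ((mem_findNeighbourPositions p.1 p.2 q).mp h).1

lemma adj_symm {p q : Int × Int} (hp : VPos p) (h : Adj p q) : Adj q p := by
  obtain ⟨p1, p2⟩ := p; obtain ⟨q1, q2⟩ := q
  unfold Adj at *
  rw [mem_findNeighbourPositions] at *
  obtain ⟨hv, hc⟩ := h
  simp only [Prod.mk.injEq, VPos] at *
  omega

lemma mem_nbrsB_iff_adj (i j : Int) (q : Int × Int) : q ∈ nbrsB i j ↔ Adj (i, j) q := by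
  obtain ⟨q1, q2⟩ := q
  unfold Adj
  rw [mem_findNeighbourPositions]
  simp only [nbrsB, List.mem_filter, List.mem_cons, List.not_mem_nil, or_false,
    decide_eq_true_eq, Prod.mk.injEq, VPos]
  omega

lemma vpos_mem_U25 {p : Int × Int} (h : VPos p) : p ∈ U25 := by
  obtain ⟨p1, p2⟩ := p
  obtain ⟨h1, h2, h3, h4⟩ := h
  interval_cases p1 <;> interval_cases p2 <;> decide

lemma U25_vpos : ∀ p ∈ U25, VPos p := by
  intro p hp
  fin_cases hp <;> exact ⟨by norm_num, by norm_num, by norm_num, by norm_num⟩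

lemma U25_len : U25.length = 25 := by decide

lemma reach_stone {board : List (List Int)} {stone : Int} {p q : Int × Int}
    (hp : StoneAt board stone p) (h : ReachS board stone p q) : StoneAt board stone q := by
  induction h with
  | refl => exact hp
  | tail _ hbc _ => exact hbc.2

lemma reach_vpos {board : List (List Int)} {stone : Int} {p q : Int × Int}
    (hp : VPos p) (h : ReachS board stone p q) : VPos q := by
  induction h with
  | refl => exact hp
  | tail _ hbc _ => exact adj_vpos hbc.1

lemma reach_symm {board : List (List Int)} {stone : Int} {p q : Int × Int}
    (hv : VPos p) (hs : StoneAt board stone p) (h : ReachS board stone p q) :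
    ReachS board stone q p := by
  induction h with
  | refl => exact Relation.ReflTransGen.refl
  | tail hab hbc ih =>
    exact Relation.ReflTransGen.head
      ⟨adj_symm (reach_vpos hv hab) hbc.1, reach_stone hs hab⟩ ih

-- ===== A-side: the BFS loop computes the reachable set =====

def AInv (board : List (List Int)) (stone : Int) (friends BFS : List (Int × Int)) : Prop :=
  friends.Nodup ∧ BFS.Nodup ∧ (∀ x ∈ friends, x ∉ BFS) ∧
  (∀ x ∈ friends, VPos x) ∧ (∀ x ∈ BFS, VPos x) ∧
  (∀ f ∈ friends, ∀ q, StepS board stone f q → q ∈ friends ∨ q ∈ BFS)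

lemma pushes_mem (board : List (List Int)) (stone : Int) (friends' : List (Int × Int)) :
    ∀ (ns b : List (Int × Int)) (q : Int × Int),
      q ∈ ns.foldl (fun b n => if pvCell board n.1 n.2 = some stone ∧ n ∉ b ∧ n ∉ friends'
                               then b ++ [n] else b) b ↔
      q ∈ b ∨ (q ∈ ns ∧ StoneAt board stone q ∧ q ∉ friends') := by
  intro ns
  induction ns with
  | nil => intro b q; simp
  | cons n t ih =>
    intro b q
    simp only [List.foldl_cons]
    by_cases hc : pvCell board n.1 n.2 = some stone ∧ n ∉ b ∧ n ∉ friends'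
    · rw [if_pos hc, ih]
      simp only [List.mem_append, List.mem_cons, List.not_mem_nil, or_false]
      constructor
      · rintro ((h | rfl) | ⟨ht, hs, hf⟩)
        · exact .inl h
        · exact .inr ⟨.inl rfl, hc.1, hc.2.2⟩
        · exact .inr ⟨.inr ht, hs, hf⟩
      · rintro (h | ⟨(rfl | ht), hs, hf⟩)
        · exact .inl (.inl h)
        · exact .inl (.inr rfl)
        · exact .inr ⟨ht, hs, hf⟩
    · rw [if_neg hc, ih]
      simp only [List.mem_cons]
      push Not at hc
      constructor
      · rintro (h | ⟨ht, hs, hf⟩)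
        · exact .inl h
        · exact .inr ⟨.inr ht, hs, hf⟩
      · rintro (h | ⟨(rfl | ht), hs, hf⟩)
        · exact .inl h
        · by_cases hb : q ∈ b
          · exact .inl hb
          · exact absurd (hc (by simpa [StoneAt] using hs) hb) hf
        · exact .inr ⟨ht, hs, hf⟩

lemma pushes_nodup (board : List (List Int)) (stone : Int) (friends' : List (Int × Int)) :
    ∀ (ns b : List (Int × Int)), b.Nodup →
      (ns.foldl (fun b n => if pvCell board n.1 n.2 = some stone ∧ n ∉ b ∧ n ∉ friends'
                            then b ++ [n] else b) b).Nodup := by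
  intro ns
  induction ns with
  | nil => intro b hb; simpa
  | cons n t ih =>
    intro b hb
    simp only [List.foldl_cons]
    by_cases hc : pvCell board n.1 n.2 = some stone ∧ n ∉ b ∧ n ∉ friends'
    · rw [if_pos hc]
      exact ih _ (List.nodup_append.mpr ⟨hb, List.nodup_singleton _,
        fun a ha b hbm heq => hc.2.1 (by rw [List.mem_singleton] at hbm; rw [← hbm, ← heq]; exact ha)⟩)
    · rw [if_neg hc]
      exact ih _ hb

lemma loop_char (board : List (List Int)) (stone : Int) :
    ∀ (fuel : Nat) (friends BFS : List (Int × Int)), AInv board stone friends BFS →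
      26 ≤ fuel + friends.length →
      ∀ q, q ∈ findFriendsLoop board stone fuel friends BFS ↔
        q ∈ friends ∨ ∃ b ∈ BFS, ReachS board stone b q := by
  intro fuel
  induction fuel with
  | zero =>
    intro friends BFS hinv hf q
    exfalso
    have hsub : friends ⊆ U25 := fun x hx => vpos_mem_U25 (hinv.2.2.2.1 x hx)
    have hle := (List.subperm_of_subset hinv.1 hsub).length_le
    rw [U25_len] at hle
    omega
  | succ fuel ih =>
    intro friends BFS hinv hf q
    obtain ⟨hfn, hbn, hdisj, hfv, hbv, hclo⟩ := hinv
    rw [findFriendsLoop]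
    cases hlast : BFS.getLast? with
    | none =>
      have hBFS : BFS = [] := List.getLast?_eq_none_iff.mp hlast
      subst hBFS; simp
    | some curr =>
      obtain ⟨ys, hys⟩ := List.getLast?_eq_some_iff.mp hlast
      have hdl : BFS.dropLast = ys := by rw [hys]; simp
      have hcur : curr ∈ BFS := by rw [hys]; simp
      have hys_sub : ys ⊆ BFS := by rw [hys]; exact List.subset_append_left _ _
      have hbn' : (ys ++ [curr]).Nodup := by rw [← hys]; exact hbn
      have hysnod : ys.Nodup := (List.nodup_append.mp hbn').1
      have hcys : curr ∉ ys := by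
        have hd := (List.nodup_append.mp hbn').2.2
        exact fun h => hd curr h curr (by simp) rfl
      rw [hdl]
      set friends' := friends ++ [curr] with hfr
      set BFS'' := (findNeighbourPositions curr.1 curr.2).foldl
        (fun b n => if pvCell board n.1 n.2 = some stone ∧ n ∉ b ∧ n ∉ friends'
                    then b ++ [n] else b) ys with hB2
      have hmem2 : ∀ x, x ∈ BFS'' ↔
          x ∈ ys ∨ (x ∈ findNeighbourPositions curr.1 curr.2 ∧ StoneAt board stone x ∧ x ∉ friends') :=
        fun x => pushes_mem board stone friends' _ ys x
      have hcurnf : curr ∉ friends := fun h => hdisj curr h hcur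
      have hinv' : AInv board stone friends' BFS'' := by
        refine ⟨?_, ?_, ?_, ?_, ?_, ?_⟩
        · rw [hfr, List.nodup_append]
          refine ⟨hfn, List.nodup_singleton _, fun a ha b hb heq => ?_⟩
          rw [List.mem_singleton] at hb
          exact hcurnf (hb ▸ heq ▸ ha)
        · exact pushes_nodup board stone friends' _ ys hysnod
        · intro x hx hx2
          rcases (hmem2 x).mp hx2 with h1 | h1
          · rcases List.mem_append.mp hx with h2 | h2
            · exact hdisj x h2 (hys_sub h1)
            · simp only [List.mem_singleton] at h2; exact hcys (h2 ▸ h1)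
          · exact h1.2.2 hx
        · intro x hx
          rcases List.mem_append.mp hx with h2 | h2
          · exact hfv x h2
          · simp only [List.mem_singleton] at h2; exact h2 ▸ hbv curr hcur
        · intro x hx
          rcases (hmem2 x).mp hx with h1 | h1
          · exact hbv x (hys_sub h1)
          · exact adj_vpos (show Adj curr x from h1.1)
        · intro f hfm q' hstep
          rcases List.mem_append.mp hfm with h2 | h2
          · rcases hclo f h2 q' hstep with h3 | h3
            · exact .inl (List.mem_append_left _ h3)
            · rw [hys] at h3
              rcases List.mem_append.mp h3 with h4 | h4
              · exact .inr ((hmem2 q').mpr (.inl h4))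
              · simp only [List.mem_singleton] at h4
                exact .inl (h4 ▸ List.mem_append_right _ (by simp))
          · simp only [List.mem_singleton] at h2
            rw [h2] at hstep
            by_cases hqf : q' ∈ friends'
            · exact .inl hqf
            · exact .inr ((hmem2 q').mpr (.inr ⟨hstep.1, hstep.2, hqf⟩))
      have hf' : 26 ≤ fuel + friends'.length := by
        simp only [hfr, List.length_append, List.length_singleton]; omega
      rw [ih friends' BFS'' hinv' hf' q]
      constructor
      · rintro (h | ⟨b, hb, hr⟩)
        · rcases List.mem_append.mp h with h1 | h1
          · exact .inl h1
          · simp only [List.mem_singleton] at h1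
            exact .inr ⟨curr, hcur, h1 ▸ Relation.ReflTransGen.refl⟩
        · rcases (hmem2 b).mp hb with h1 | h1
          · exact .inr ⟨b, hys_sub h1, hr⟩
          · exact .inr ⟨curr, hcur, Relation.ReflTransGen.head ⟨h1.1, h1.2.1⟩ hr⟩
      · have key : ∀ x, ReachS board stone curr x →
            (x ∈ friends' ∨ ∃ b' ∈ BFS'', ReachS board stone b' x) := by
          intro x hx
          induction hx with
          | refl => exact .inl (List.mem_append_right _ (by simp))
          | tail hab hbc ih2 =>
            rename_i m c
            rcases ih2 with hm | ⟨b', hb', hr⟩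
            · rcases List.mem_append.mp hm with hmf | hmc
              · rcases hclo m hmf c hbc with h3 | h3
                · exact .inl (List.mem_append_left _ h3)
                · rw [hys] at h3
                  rcases List.mem_append.mp h3 with h4 | h4
                  · exact .inr ⟨c, (hmem2 c).mpr (.inl h4), Relation.ReflTransGen.refl⟩
                  · simp only [List.mem_singleton] at h4
                    exact .inl (h4 ▸ List.mem_append_right _ (by simp))
              · simp only [List.mem_singleton] at hmc
                rw [hmc] at hbc
                by_cases hcf : c ∈ friends'
                · exact .inl hcf
                · exact .inr ⟨c, (hmem2 c).mpr (.inr ⟨hbc.1, hbc.2, hcf⟩),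
                    Relation.ReflTransGen.refl⟩
            · exact .inr ⟨b', hb', hr.tail hbc⟩
        rintro (h | ⟨b, hb, hr⟩)
        · exact .inl (List.mem_append_left _ h)
        · rw [hys] at hb
          rcases List.mem_append.mp hb with h1 | h1
          · exact .inr ⟨b, (hmem2 b).mpr (.inl h1), hr⟩
          · simp only [List.mem_singleton] at h1
            exact key q (h1 ▸ hr)

lemma findFriends_char (board : List (List Int)) (r c stone : Int) (hv : VPos (r, c)) :
    ∀ q, q ∈ findFriends board r c stone ↔ ReachS board stone (r, c) q := by
  intro q
  rw [findFriends, loop_char board stone 30 [] [(r, c)]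
    ⟨List.nodup_nil, List.nodup_singleton _, by simp, by simp,
     by simpa using hv, by simp⟩ (by simp)]
  simp

lemma int_sum_map_natCast {α : Type} (l : List α) (f : α → Nat) :
    (l.map (fun x => ((f x : Nat) : Int))).sum = ((l.map f).sum : Int) := by
  induction l with
  | nil => simp
  | cons x t ih => simp [ih]

lemma checkLiberty_eq_zero (board : List (List Int)) (r c stone : Int) (hv : VPos (r, c)) :
    checkLiberty board r c stone = 0 ↔
      ∀ q, ReachS board stone (r, c) q → ¬ HasLib board q := by
  rw [checkLiberty]
  rw [PySem.List.foldl_congr_mem (findFriends board r c stone)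
    (fun count f => (findNeighbourPositions f.1 f.2).foldl
      (fun c n => if pvCell board n.1 n.2 = some 0 then c + 1 else c) count)
    (fun count f => count + (((findNeighbourPositions f.1 f.2).countP
      (fun n => decide (pvCell board n.1 n.2 = some 0))) : Int))
    0 (fun acc x _ => PySem.List.foldl_ite_add_one _ _ acc)]
  rw [PySem.List.foldl_add, int_sum_map_natCast]
  simp only [zero_add, Nat.cast_eq_zero, List.sum_eq_zero_iff_forall_eq_nat]
  constructor
  · intro h q hr ⟨n, hadj, hn⟩
    have hq := (findFriends_char board r c stone hv q).mpr hr
    have := h _ (List.mem_map.mpr ⟨q, hq, rfl⟩)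
    rw [List.countP_eq_zero] at this
    exact this n hadj (by simpa using hn)
  · intro h x hx
    rcases List.mem_map.mp hx with ⟨f, hf, rfl⟩
    rw [List.countP_eq_zero]
    intro n hn hn0
    exact h f ((findFriends_char board r c stone hv f).mp hf)
      ⟨n, hn, by simpa using hn0⟩

-- ===== B-side: the saturation computes the alive set =====

lemma set_add_prefix {α : Type} [BEq α] (s : PySem.Set α) (x : α) :
    s <+: PySem.Set.add s x := by
  unfold PySem.Set.add
  split
  · exact List.prefix_rfl
  · exact ⟨[x], rfl⟩

lemma mem_of_prefix_fold {α β : Type} (G : List α → β → List α)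
    (hG : ∀ s p, s <+: G s p) :
    ∀ (l : List β) (s : List α), s <+: l.foldl G s := by
  intro l
  induction l with
  | nil => intro s; exact List.prefix_rfl
  | cons x t ih => intro s; exact (hG s x).trans (ih (G s x))

lemma fold_inv {α β : Type} (G : List α → β → List α) (J : List α → Prop)
    (l : List β) (hG : ∀ s p, p ∈ l → J s → J (G s p)) :
    ∀ s, J s → J (l.foldl G s) := by
  induction l with
  | nil => intro s hs; exact hs
  | cons x t ih =>
    intro s hs
    exact ih (fun s p hp => hG s p (List.mem_cons_of_mem _ hp)) _
      (hG s x (List.mem_cons_self) hs)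

lemma fold_adds {α β : Type} (G : List α → β → List α)
    (hG : ∀ s p, s <+: G s p) (l : List β) (x : β) (v : α) (hx : x ∈ l)
    (s : List α) (hv : ∀ s', s ⊆ s' → v ∈ G s' x) :
    v ∈ l.foldl G s := by
  induction l generalizing s with
  | nil => cases hx
  | cons y t ih =>
    simp only [List.foldl_cons]
    rcases List.mem_cons.mp hx with rfl | hxt
    · exact (mem_of_prefix_fold G hG t (G s x)).subset (hv s (fun a ha => ha))
    · exact ih hxt (G s y) (fun s' hs' => hv s' (fun a ha => hs' ((hG s y).subset ha)))

-- the nested 5×5 fold is one fold over U25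
lemma nested_eq_U25 {α : Type} (F : α → Int × Int → α) (a : α) :
    (PySem.List.pyRange 0 5 1).foldl (fun s i =>
      (PySem.List.pyRange 0 5 1).foldl (fun s j => F s (i, j)) s) a =
    U25.foldl F a := by
  have h5 : PySem.List.pyRange 0 5 1 = [0, 1, 2, 3, 4] := by decide
  rw [h5, U25, List.foldl_flatMap]
  simp only [List.foldl_map]

lemma seed_eq : ∀ (board : List (List Int)) (stone : Int),
    aliveSeed board stone = U25.foldl (fun s p =>
      if pvCell board p.1 p.2 = some stone ∧
          (nbrsB p.1 p.2).any (fun x => pvCell board x.1 x.2 == some 0)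
      then PySem.Set.add s p else s) PySem.Set.empty :=
  fun board stone => nested_eq_U25
    (fun s p => if pvCell board p.1 p.2 = some stone ∧
        ((nbrsB p.1 p.2).any fun x => pvCell board x.1 x.2 == some 0) = true
      then PySem.Set.add s p else s) PySem.Set.empty

lemma spread_eq : ∀ (board : List (List Int)) (stone : Int) (s0 : PySem.Set (Int × Int)),
    spreadRound board stone s0 = U25.foldl (fun s p =>
      if pvCell board p.1 p.2 = some stone ∧ p ∉ s ∧
          (nbrsB p.1 p.2).any (fun x => decide (x ∈ s))
      then PySem.Set.add s p else s) s0 :=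
  fun board stone s0 => nested_eq_U25
    (fun s p => if pvCell board p.1 p.2 = some stone ∧ p ∉ s ∧
        ((nbrsB p.1 p.2).any fun x => decide (x ∈ s)) = true
      then PySem.Set.add s p else s) s0

lemma seed_char (board : List (List Int)) (stone : Int) (q : Int × Int) :
    q ∈ aliveSeed board stone ↔ VPos q ∧ StoneAt board stone q ∧ HasLib board q := by
  rw [seed_eq]
  constructor
  · intro hq
    refine fold_inv _ (fun s => ∀ x ∈ s, VPos x ∧ StoneAt board stone x ∧ HasLib board x)
      U25 ?_ PySem.Set.empty (by simp [PySem.Set.empty]) q hq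
    intro s p hp hJ x hx
    split at hx
    · rename_i hcond
      rcases (PySem.Set.mem_add s p x).mp hx with h1 | rfl
      · exact hJ x h1
      · refine ⟨U25_vpos x hp, hcond.1, ?_⟩
        rcases List.any_eq_true.mp hcond.2 with ⟨n, hn, hn0⟩
        exact ⟨n, (mem_nbrsB_iff_adj x.1 x.2 n).mp hn, by simpa using hn0⟩
    · exact hJ x hx
  · rintro ⟨hvq, hsq, hlq⟩
    refine fold_adds _ (fun s p => by split; exacts [set_add_prefix s p, List.prefix_rfl])
      U25 q q (vpos_mem_U25 hvq) _ ?_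
    intro s' _
    have hany : ((nbrsB q.1 q.2).any fun x => pvCell board x.1 x.2 == some 0) = true := by
      rcases hlq with ⟨n, hadj, hn0⟩
      exact List.any_eq_true.mpr ⟨n, (mem_nbrsB_iff_adj q.1 q.2 n).mpr hadj, by simpa using hn0⟩
    rw [if_pos ⟨hsq, hany⟩]
    exact (PySem.Set.mem_add s' q q).mpr (.inr rfl)

def Justified (board : List (List Int)) (stone : Int) (s : List (Int × Int)) : Prop :=
  ∀ q ∈ s, VPos q ∧ StoneAt board stone q ∧
    ∃ b, VPos b ∧ StoneAt board stone b ∧ HasLib board b ∧ ReachS board stone b q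

lemma spread_sound (board : List (List Int)) (stone : Int) (s : PySem.Set (Int × Int))
    (h : Justified board stone s) : Justified board stone (spreadRound board stone s) := by
  rw [spread_eq]
  refine fold_inv _ (Justified board stone) U25 ?_ s h
  intro s' p hp hJ x hx
  split at hx
  · rename_i hcond
    rcases (PySem.Set.mem_add s' p x).mp hx with h1 | rfl
    · exact hJ x h1
    · have hvx := U25_vpos x hp
      rcases List.any_eq_true.mp hcond.2.2 with ⟨n, hn, hns⟩
      have hnmem : n ∈ s' := by simpa using hns
      obtain ⟨hvn, hsn, b, hb⟩ := hJ n hnmem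
      refine ⟨hvx, hcond.1, b, hb.1, hb.2.1, hb.2.2.1, hb.2.2.2.tail ?_⟩
      exact ⟨adj_symm hvx ((mem_nbrsB_iff_adj x.1 x.2 n).mp hn), hcond.1⟩
  · exact hJ x hx

lemma spread_prefix (board : List (List Int)) (stone : Int) (s : PySem.Set (Int × Int)) :
    s <+: spreadRound board stone s := by
  rw [spread_eq]
  exact mem_of_prefix_fold _ (fun s p => by split; exacts [set_add_prefix s p, List.prefix_rfl]) U25 s

lemma spread_nodup (board : List (List Int)) (stone : Int) (s : PySem.Set (Int × Int))
    (h : s.Nodup) : (spreadRound board stone s).Nodup := by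
  rw [spread_eq]
  refine fold_inv _ List.Nodup U25 ?_ s h
  intro s' p _ hn
  split
  · exact PySem.Set.nodup_add s' p hn
  · exact hn

lemma spread_vpos (board : List (List Int)) (stone : Int) (s : PySem.Set (Int × Int))
    (h : ∀ q ∈ s, VPos q) : ∀ q ∈ spreadRound board stone s, VPos q := by
  rw [spread_eq]
  refine fold_inv _ (fun s => ∀ q ∈ s, VPos q) U25 ?_ s h
  intro s' p hp hv x hx
  split at hx
  · rcases (PySem.Set.mem_add s' p x).mp hx with h1 | rfl
    · exact hv x h1
    · exact U25_vpos x hp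
  · exact hv x hx

-- a set closed under the propagation step
def Closed (board : List (List Int)) (stone : Int) (s : List (Int × Int)) : Prop :=
  ∀ q, VPos q → StoneAt board stone q → (∃ n, Adj q n ∧ n ∈ s) → q ∈ s

lemma closed_of_fixpoint (board : List (List Int)) (stone : Int) (s : PySem.Set (Int × Int))
    (h : spreadRound board stone s = s) : Closed board stone s := by
  intro q hv hst ⟨n, hadj, hns⟩
  have hq : q ∈ spreadRound board stone s := by
    rw [spread_eq]
    refine fold_adds _ (fun s p => by split; exacts [set_add_prefix s p, List.prefix_rfl])
      U25 q q (vpos_mem_U25 hv) _ ?_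
    intro s' hs'
    by_cases hq' : q ∈ s'
    · split
      · exact (PySem.Set.mem_add s' q q).mpr (.inl hq')
      · exact hq'
    · rw [if_pos ⟨hst, hq', List.any_eq_true.mpr
        ⟨n, (mem_nbrsB_iff_adj q.1 q.2 n).mpr hadj, by simpa using hs' hns⟩⟩]
      exact (PySem.Set.mem_add s' q q).mpr (.inr rfl)
  rwa [h] at hq

lemma iterate_closed (board : List (List Int)) (stone : Int) :
    ∀ (k : Nat) (s : PySem.Set (Int × Int)), s.Nodup → (∀ q ∈ s, VPos q) →
      25 ≤ k + s.length → Closed board stone ((spreadRound board stone)^[k] s) := by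
  intro k
  induction k with
  | zero =>
    intro s hn hv hlen
    have hsub : s ⊆ U25 := fun x hx => vpos_mem_U25 (hv x hx)
    have hsp := List.subperm_of_subset hn hsub
    have hperm := hsp.perm_of_length_le (by rw [U25_len]; omega)
    intro q hvq _ _
    simp only [Function.iterate_zero, id]
    exact hperm.mem_iff.mpr (vpos_mem_U25 hvq)
  | succ k ih =>
    intro s hn hv hlen
    by_cases hfix : spreadRound board stone s = s
    · rw [Function.iterate_fixed hfix]
      exact closed_of_fixpoint board stone s hfix
    · have hpre := spread_prefix board stone s
      have hlt : s.length < (spreadRound board stone s).length := by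
        rcases Nat.lt_or_ge s.length (spreadRound board stone s).length with h | h
        · exact h
        · exact absurd (hpre.eq_of_length (Nat.le_antisymm hpre.length_le h)).symm hfix
      rw [Function.iterate_succ_apply]
      exact ih (spreadRound board stone s) (spread_nodup board stone s hn)
        (spread_vpos board stone s hv) (by omega)

lemma foldl_const_iterate {α β : Type} (f : α → α) :
    ∀ (l : List β) (a : α), l.foldl (fun s _ => f s) a = f^[l.length] a := by
  intro l
  induction l with
  | nil => intro a; simp
  | cons x t ih => intro a; simp [ih, Function.iterate_succ_apply]

lemma iterate_prefix {α : Type} (f : List α → List α) (hf : ∀ s, s <+: f s) :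
    ∀ (k : Nat) (s : List α), s <+: f^[k] s := by
  intro k
  induction k with
  | zero => intro s; simp
  | succ k ih => intro s; rw [Function.iterate_succ_apply]; exact (hf s).trans (ih (f s))

lemma seed_nodup (board : List (List Int)) (stone : Int) : (aliveSeed board stone).Nodup := by
  rw [seed_eq]
  refine fold_inv _ List.Nodup U25 ?_ PySem.Set.empty (by simp [PySem.Set.empty])
  intro s' p _ hn
  split
  · exact PySem.Set.nodup_add s' p hn
  · exact hn

lemma aliveFix_eq_iterate (board : List (List Int)) (stone : Int) :
    aliveFix board stone = (spreadRound board stone)^[25] (aliveSeed board stone) := by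
  rw [aliveFix, foldl_const_iterate,
    show (PySem.List.pyRange 0 25 1).length = 25 from by decide]

lemma aliveFix_char (board : List (List Int)) (stone : Int) (q : Int × Int) :
    q ∈ aliveFix board stone ↔
      ∃ b, VPos b ∧ StoneAt board stone b ∧ HasLib board b ∧ ReachS board stone b q := by
  constructor
  · intro hq
    have hJ : Justified board stone (aliveFix board stone) := by
      rw [aliveFix]
      refine fold_inv _ (Justified board stone) _ ?_ _ ?_
      · intro s _ _ hJ; exact spread_sound board stone s hJ
      · intro x hx
        obtain ⟨hv, hs, hl⟩ := (seed_char board stone x).mp hx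
        exact ⟨hv, hs, x, hv, hs, hl, Relation.ReflTransGen.refl⟩
    obtain ⟨_, _, b, hb⟩ := hJ q hq
    exact ⟨b, hb⟩
  · rintro ⟨b, hvb, hsb, hlb, hr⟩
    have hclosed : Closed board stone (aliveFix board stone) := by
      rw [aliveFix_eq_iterate]
      exact iterate_closed board stone 25 (aliveSeed board stone)
        (seed_nodup board stone)
        (fun x hx => ((seed_char board stone x).mp hx).1) (by omega)
    have hseedsub : aliveSeed board stone ⊆ aliveFix board stone := by
      rw [aliveFix_eq_iterate]
      exact (iterate_prefix _ (spread_prefix board stone) 25 _).subset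
    have hbmem : b ∈ aliveFix board stone :=
      hseedsub ((seed_char board stone b).mpr ⟨hvb, hsb, hlb⟩)
    clear hlb
    induction hr with
    | refl => exact hbmem
    | tail hab hbc ih =>
      rename_i m c
      exact hclosed c (adj_vpos hbc.1) hbc.2
        ⟨m, adj_symm (reach_vpos hvb hab) hbc.1, ih⟩

-- ===== assembly =====

lemma dead_cond_iff (board : List (List Int)) (stone : Int) (i j : Int) (hv : VPos (i, j)) :
    (pvCell board i j = some stone ∧ checkLiberty board i j stone = 0) ↔
    (pvCell board i j = some stone ∧ (i, j) ∉ aliveFix board stone) := by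
  apply and_congr_right
  intro hst
  have hst' : StoneAt board stone (i, j) := hst
  rw [checkLiberty_eq_zero board i j stone hv, aliveFix_char]
  constructor
  · rintro h ⟨b, hvb, hsb, hlb, hrb⟩
    exact h b (reach_symm hvb hsb hrb) hlb
  · intro h q hr hl
    exact h ⟨q, reach_vpos hv hr, reach_stone hst' hr, hl, reach_symm hv hst' hr⟩

-- ===== VERDICT (by name: the statement is the Claim_ definition above) =====
theorem findDeadStones_spec : Claim_equal_findDeadStones := by
  unfold Claim_equal_findDeadStones
  intro board stone _ _
  unfold Spec_findDeadStones
  show findDeadStones board stone = findDeadStones_alt board stone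
  rw [findDeadStones, findDeadStones_alt,
    nested_eq_U25 (fun acc2 p => if pvCell board p.1 p.2 = some stone then
      (if checkLiberty board p.1 p.2 stone = 0 then acc2 ++ [[p.1, p.2]] else acc2)
      else acc2) [],
    nested_eq_U25 (fun acc p => if pvCell board p.1 p.2 = some stone ∧ (p.1, p.2) ∉ aliveFix board stone
      then acc ++ [[p.1, p.2]] else acc) []]
  apply PySem.List.foldl_congr_mem
  intro acc p hp
  have hv : VPos p := U25_vpos p hp
  have hiff := dead_cond_iff board stone p.1 p.2 hv
  by_cases h1 : pvCell board p.1 p.2 = some stone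
  · by_cases h2 : checkLiberty board p.1 p.2 stone = 0
    · rw [if_pos h1, if_pos h2, if_pos (hiff.mp ⟨h1, h2⟩)]
    · rw [if_pos h1, if_neg h2, if_neg (fun hc => h2 (hiff.mpr hc).2)]
  · rw [if_neg h1, if_neg (fun hc => h1 hc.1)]
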